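-- pv_equiv track=rewrite | github.com/sehagler/nlp_pipeline | production/tool_lib/py/processing_tools_lib/text_processing_tools.py | remove_repeated_substrings
-- ===== SOURCE A (Python) =====
-- def remove_repeated_substrings(text):
--     ctr = 0
--     while True:
--         ctr += 1
--         stop_flg = True
--         for i in range(int(len(text)/2)):
--             if text[:i+1] == text[i+1:2*(i+1)]:
--                 text = text[i+1:]
--                 stop_flg = False
--                 break
--         if stop_flg or ctr > 100:
--             break
--     return text
-- ===== SOURCE B (Python) =====
-- def remove_repeated_substrings(text):
--     # Truncated Z-function: z[i] = lcp(text, text[i:]) capped at i -- enough to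
--     # decide whether text[:i] == text[i:2*i].  The scan stops at the first i
--     # with z-value >= i (the smallest removable prefix) and strips it; at most
--     # 101 removals, as in the original.
--     for _ in range(101):
--         n = len(text)
--         half = n // 2
--         z = [0]
--         l = r = 0
--         L = 0
--         for i in range(1, half + 1):
--             k = 0
--             if i < r:
--                 k = min(r - i, z[i - l])
--             while k < i and i + k < n and text[k] == text[i + k]:
--                 k += 1
--             if k >= i:
--                 L = i
--                 break
--             z.append(k)
--             if i + k > r:
--                 l, r = i, i + k
--         if L == 0:
--             break
--         text = text[L:]
--     return text
-- ===== Notes on version B (the rewrite author's own statement) =====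
-- stated objective: alternative
-- what changed: B computes a truncated Z-function (longest common prefix of the text with each suffix, capped at the position) with the standard l/r window reuse and strips at the first position i whose z-value reaches i, instead of A's per-candidate building and comparing of two fresh slices.
import Mathlib
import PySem

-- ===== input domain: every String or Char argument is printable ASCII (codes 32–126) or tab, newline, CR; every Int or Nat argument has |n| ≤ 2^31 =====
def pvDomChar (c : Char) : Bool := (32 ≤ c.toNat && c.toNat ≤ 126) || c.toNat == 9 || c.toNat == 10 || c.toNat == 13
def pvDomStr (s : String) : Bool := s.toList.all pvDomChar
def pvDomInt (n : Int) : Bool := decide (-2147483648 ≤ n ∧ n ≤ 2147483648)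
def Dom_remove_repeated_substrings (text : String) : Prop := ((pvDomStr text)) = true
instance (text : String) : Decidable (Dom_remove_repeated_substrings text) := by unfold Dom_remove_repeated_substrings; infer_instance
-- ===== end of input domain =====

-- B replaces A's per-candidate slice comparisons by a Z-function computed once
-- per removal step (smallest L with z[L] >= L); same return value.

-- ===== PORT A =====
-- inner `for i in range(int(len(text)/2))`: returns `some text[i+1:]` on the
-- first i with text[:i+1] == text[i+1:2*(i+1)], else none (loop finished).
-- `int(len(text)/2)` = len // 2 for a nonnegative length = Nat division.
def pvAFind (text : String) (i : Nat) : Option String :=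
  if i < text.toList.length / 2 then
    if PySem.Str.slice text none (some ((i : Int) + 1))
         == PySem.Str.slice text (some ((i : Int) + 1)) (some (2 * ((i : Int) + 1)))
    then some (PySem.Str.slice text (some ((i : Int) + 1)) none)
    else pvAFind text (i + 1)
  else none
termination_by text.toList.length / 2 - i
decreasing_by omega

-- the `while True` loop; ctr as in A, fuel 101 is never exhausted (ctr stops first)
def pvALoop : Nat → Nat → String → String
  | 0, _, t => t
  | fuel + 1, ctr, t =>
    let ctr' := ctr + 1
    match pvAFind t 0 with
    | none => t
    | some t' => if ctr' > 100 then t' else pvALoop fuel ctr' t'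

def remove_repeated_substrings (text : String) : String := pvALoop 101 0 text

-- ===== PORT B =====
-- `while k < i and i + k < n and text[k] == text[i + k]: k += 1`
def pvZExtend (s : List Char) (i : Nat) (k : Nat) : Nat :=
  if h : k < i ∧ i + k < s.length ∧ s.getD k ' ' == s.getD (i + k) ' ' then
    pvZExtend s i (k + 1)
  else k
termination_by i - k
decreasing_by have := h.1; omega

-- `for i in range(1, half + 1)` of the truncated Z-scan, state (z, l, r);
-- returns the Python loop's final L (the break value, or 0 if never set)
def pvBScan (s : List Char) (z : List Nat) (l r i : Nat) : Nat :=
  if i ≤ s.length / 2 then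
    if pvZExtend s i (if i < r then min (r - i) (z.getD (i - l) 0) else 0) ≥ i then i
    else if i + pvZExtend s i (if i < r then min (r - i) (z.getD (i - l) 0) else 0) > r then
      pvBScan s (z ++ [pvZExtend s i (if i < r then min (r - i) (z.getD (i - l) 0) else 0)]) i
        (i + pvZExtend s i (if i < r then min (r - i) (z.getD (i - l) 0) else 0)) (i + 1)
    else pvBScan s (z ++ [pvZExtend s i (if i < r then min (r - i) (z.getD (i - l) 0) else 0)]) l r (i + 1)
  else 0
termination_by s.length / 2 + 1 - i

-- `for _ in range(101): ... text = text[L:]`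
def pvBLoop : Nat → List Char → List Char
  | 0, t => t
  | fuel + 1, t =>
    let L := pvBScan t [0] 0 0 1
    if L = 0 then t else pvBLoop fuel (t.drop L)

def remove_repeated_substrings_alt (text : String) : String :=
  String.ofList (pvBLoop 101 text.toList)

-- ===== PRECONDITION & SPEC =====
def Spec_remove_repeated_substrings (text : String) (out : String) : Prop := out = remove_repeated_substrings_alt text
instance (text : String) (out : String) : Decidable (Spec_remove_repeated_substrings text out) := by unfold Spec_remove_repeated_substrings; infer_instance

-- ===== CLAIM (what is proved, stated in full; the proofs are below) =====
def Claim_equal_remove_repeated_substrings : Prop := ∀ (text : String), Dom_remove_repeated_substrings text → Spec_remove_repeated_substrings text (remove_repeated_substrings text)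

-- ===== LEMMAS AND PROOFS =====

-- longest common prefix length of two char lists
def pvLcp : List Char → List Char → Nat
  | a :: s, b :: t => if a = b then pvLcp s t + 1 else 0
  | _, _ => 0

-- proof-only specification of B's scan: first i in [i, n/2] with lcp ≥ i, else 0
def pvFindSpec (s : List Char) (i : Nat) : Nat :=
  if i ≤ s.length / 2 then
    (if i ≤ pvLcp s (s.drop i) then i else pvFindSpec s (i + 1))
  else 0
termination_by s.length / 2 + 1 - i

theorem pv_lcp_le_right : ∀ s t : List Char, pvLcp s t ≤ t.length := by
  intro s; induction s with
  | nil => intro t; cases t <;> simp [pvLcp]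
  | cons a s ih =>
    intro t; cases t with
    | nil => simp [pvLcp]
    | cons b t =>
      simp only [pvLcp, List.length_cons]
      split_ifs <;> [exact Nat.succ_le_succ (ih t); omega]

theorem pv_lcp_match : ∀ (s t : List Char) (j : Nat), j < pvLcp s t →
    s.getD j ' ' = t.getD j ' ' := by
  intro s; induction s with
  | nil => intro t j h; cases t <;> simp [pvLcp] at h
  | cons a s ih =>
    intro t j h; cases t with
    | nil => simp [pvLcp] at h
    | cons b t =>
      simp only [pvLcp] at h
      split_ifs at h with hab
      · cases j with
        | zero => simpa using hab
        | succ j => simpa using ih t j (by omega)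
      · omega

theorem pv_lcp_mismatch : ∀ (s t : List Char), pvLcp s t < s.length → pvLcp s t < t.length →
    s.getD (pvLcp s t) ' ' ≠ t.getD (pvLcp s t) ' ' := by
  intro s; induction s with
  | nil => intro t h _; simp at h
  | cons a s ih =>
    intro t h1 h2; cases t with
    | nil => simp at h2
    | cons b t =>
      simp only [pvLcp] at h1 h2 ⊢
      split_ifs at h1 h2 ⊢ with hab
      · simpa using ih t (by simpa using h1) (by simpa using h2)
      · simpa using hab

theorem pv_lcp_lower : ∀ (s t : List Char) (k : Nat), k ≤ s.length → k ≤ t.length →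
    (∀ j < k, s.getD j ' ' = t.getD j ' ') → k ≤ pvLcp s t := by
  intro s; induction s with
  | nil => intro t k h _ _; simp at h; omega
  | cons a s ih =>
    intro t k h1 h2 hm; cases t with
    | nil => simp [pvLcp]; simp at h2; omega
    | cons b t =>
      cases k with
      | zero => omega
      | succ k =>
        have hab : a = b := by simpa using hm 0 (by omega)
        have hunf : pvLcp (a :: s) (b :: t) = pvLcp s t + 1 := by simp [pvLcp, hab]
        rw [hunf]
        have := ih t k (by simpa using h1) (by simpa using h2)
          (fun j hj => by simpa using hm (j + 1) (by omega))
        omega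

theorem pv_getD_drop (cs : List Char) (s j : Nat) :
    (cs.drop s).getD j ' ' = cs.getD (s + j) ' ' := by
  simp [List.getD_eq_getElem?_getD, List.getElem?_drop]

-- pvZExtend reaches min(lcp, i) from any lower bound
theorem pv_extend_eq (s : List Char) (i : Nat) (hi : 1 ≤ i) :
    ∀ k, k ≤ min (pvLcp s (s.drop i)) i → pvZExtend s i k = min (pvLcp s (s.drop i)) i := by
  intro k hk
  induction hm : min (pvLcp s (s.drop i)) i - k using Nat.strong_induction_on generalizing k with
  | _ m ih =>
  set L := pvLcp s (s.drop i) with hL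
  have hLd : L ≤ s.length - i := by
    have := pv_lcp_le_right s (s.drop i); simpa [List.length_drop] using this
  rw [pvZExtend]
  by_cases hkL : k < min L i
  · have hguard : k < i ∧ i + k < s.length ∧ s.getD k ' ' == s.getD (i + k) ' ' := by
      refine ⟨by omega, by omega, ?_⟩
      have := pv_lcp_match s (s.drop i) k (by omega)
      rw [pv_getD_drop] at this
      exact beq_iff_eq.mpr this
    rw [dif_pos hguard]
    exact ih (min L i - (k + 1)) (by omega) (k + 1) (by omega) rfl
  · have hkL' : k = min L i := by omega
    subst hkL'
    have hguard : ¬ (min L i < i ∧ i + min L i < s.length ∧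
        s.getD (min L i) ' ' == s.getD (i + min L i) ' ') := by
      rintro ⟨h0, h1, h2⟩
      have hLlt : min L i = L := by omega
      rw [hLlt] at h1 h2
      have hmm := pv_lcp_mismatch s (s.drop i) (by omega) (by simp [List.length_drop]; omega)
      rw [pv_getD_drop] at hmm
      exact hmm (beq_iff_eq.mp h2)
    rw [dif_neg hguard]

-- getD through append of a single element
theorem pv_getD_append (z : List Nat) (j k : Nat) :
    (z ++ [k]).getD j 0 = if j < z.length then z.getD j 0 else if j = z.length then k else 0 := by
  simp only [List.getD_eq_getElem?_getD, List.getElem?_append]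
  split_ifs with h1 h2
  · rfl
  · subst h2; simp
  · rw [List.getElem?_eq_none (by simp; omega)]
    rfl

-- invariant of B's scan: stored entries are exact lcp values, window is a prefix match
theorem pv_scan_correct (s : List Char) :
    ∀ (i : Nat) (z : List Nat) (l r : Nat), z.length = i → 1 ≤ i →
    (∀ j, 1 ≤ j → j < i → z.getD j 0 = pvLcp s (s.drop j)) →
    (i < r → 1 ≤ l ∧ l < i ∧ r = l + pvLcp s (s.drop l)) →
    pvBScan s z l r i = pvFindSpec s i := by
  intro i
  induction hm : s.length / 2 + 1 - i using Nat.strong_induction_on generalizing i with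
  | _ m ih =>
  intro z l r hlen hi hent hwin
  rw [pvBScan, pvFindSpec]
  by_cases his : i ≤ s.length / 2
  · rw [if_pos his, if_pos his]
    set L := pvLcp s (s.drop i) with hLdef
    have hLd : L ≤ s.length - i := by
      have := pv_lcp_le_right s (s.drop i); simpa [List.length_drop] using this
    set k0 := if i < r then min (r - i) (z.getD (i - l) 0) else 0 with hk0
    have hk0le : k0 ≤ L := by
      by_cases hir : i < r
      · obtain ⟨hl1, hl2, hr⟩ := hwin hir
        have hzl : z.getD (i - l) 0 = pvLcp s (s.drop (i - l)) :=
          hent (i - l) (by omega) (by omega)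
        rw [hk0, if_pos hir, hzl]
        set Ll := pvLcp s (s.drop l) with hLl
        have hLlb : Ll ≤ s.length - l := by
          have := pv_lcp_le_right s (s.drop l); simpa [List.length_drop] using this
        set k0' := min (r - i) (pvLcp s (s.drop (i - l))) with hk0'
        apply pv_lcp_lower
        · have : k0' ≤ r - i := by omega
          omega
        · simp [List.length_drop]; omega
        · intro j hjk
          rw [pv_getD_drop]
          have hja : s.getD j ' ' = s.getD ((i - l) + j) ' ' := by
            have := pv_lcp_match s (s.drop (i - l)) j (by omega)
            rwa [pv_getD_drop] at this
          have hjb : s.getD ((i - l) + j) ' ' = s.getD (i + j) ' ' := by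
            have := pv_lcp_match s (s.drop l) ((i - l) + j) (by omega)
            rw [pv_getD_drop] at this
            have harg : l + ((i - l) + j) = i + j := by omega
            rw [harg] at this
            exact this
          rw [hja, hjb]
      · rw [hk0, if_neg hir]; omega
    by_cases hbig0 : k0 ≥ i
    · -- extension loop does not run (k0 < i fails); strip at i, and indeed i ≤ L
      have hk : pvZExtend s i k0 = k0 := by
        rw [pvZExtend, dif_neg (by rintro ⟨h, _⟩; omega)]
      have hiL : i ≤ L := le_trans hbig0 hk0le
      rw [hk, if_pos hbig0, if_pos hiL]
    · have hk : pvZExtend s i k0 = min L i := pv_extend_eq s i hi k0 (by omega)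
      rw [hk]
      by_cases hge : min L i ≥ i
      · rw [if_pos hge, if_pos (by omega)]
      · have hnotiL : ¬ i ≤ L := by omega
        rw [if_neg hge, if_neg hnotiL]
        have hkL : min L i = L := by omega
        have hent' : ∀ j, 1 ≤ j → j < i + 1 →
            (z ++ [min L i]).getD j 0 = pvLcp s (s.drop j) := by
          intro j h1 h2
          rw [pv_getD_append, hlen]
          by_cases hji : j < i
          · rw [if_pos hji]; exact hent j h1 hji
          · have : j = i := by omega
            subst this
            rw [if_neg (by omega), if_pos rfl, hkL]
        have hlen' : (z ++ [min L i]).length = i + 1 := by simp [hlen]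
        by_cases hbr : i + min L i > r
        · rw [if_pos hbr]
          exact ih (s.length / 2 + 1 - (i + 1)) (by omega) (i + 1) rfl _ _ _ hlen'
            (by omega) hent' (fun hlt => ⟨by omega, by omega, by rw [hkL]⟩)
        · rw [if_neg hbr]
          refine ih (s.length / 2 + 1 - (i + 1)) (by omega) (i + 1) rfl _ _ _ hlen'
            (by omega) hent' (fun hlt => ?_)
          have hir : i < r := by omega
          obtain ⟨h1, h2, h3⟩ := hwin hir
          exact ⟨h1, by omega, h3⟩
  · rw [if_neg his, if_neg his]

theorem pv_scan_spec (t : List Char) : pvBScan t [0] 0 0 1 = pvFindSpec t 1 :=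
  pv_scan_correct t 1 [0] 0 0 (by simp) le_rfl (by omega) (by omega)

-- take/drop equality ⟺ pointwise getD match (within bounds)
theorem pv_take_drop_eq_iff (t : List Char) (cand : Nat) (h : 2 * cand ≤ t.length) :
    (t.take cand = (t.drop cand).take cand) ↔
      ∀ j < cand, t.getD j ' ' = t.getD (cand + j) ' ' := by
  constructor
  · intro heq j hj
    have h1 : j < t.length := by omega
    have h2 : cand + j < t.length := by omega
    have := congrArg (fun l => l.getD j ' ') heq
    simpa [List.getD_eq_getElem?_getD, List.getElem?_take, List.getElem?_drop, hj,
      h1, h2, List.getElem?_eq_getElem] using this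
  · intro hp
    apply List.ext_getElem
    · simp; omega
    · intro i h1 h2
      have hi : i < cand := by simp at h1; omega
      have h3 : i < t.length := by omega
      have h4 : cand + i < t.length := by omega
      have := hp i hi
      simpa [List.getD_eq_getElem?_getD, List.getElem?_eq_getElem, h3, h4,
        List.getElem_take, List.getElem_drop] using this

-- A's slice condition at candidate length L ⟺ L ≤ lcp(t, t.drop L)
theorem pv_cond_iff (t : List Char) (L : Nat) (hL : 1 ≤ L) (h2 : 2 * L ≤ t.length) :
    (t.take L = (t.drop L).take L) ↔ L ≤ pvLcp t (t.drop L) := by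
  rw [pv_take_drop_eq_iff t L h2]
  constructor
  · intro hm
    apply pv_lcp_lower
    · omega
    · simp [List.length_drop]; omega
    · intro j hj; rw [pv_getD_drop]; exact hm j hj
  · intro hle j hj
    have := pv_lcp_match t (t.drop L) j (by omega)
    rwa [pv_getD_drop] at this

-- A's candidate scan agrees with the scan specification
theorem pv_find_equiv (t : List Char) : ∀ i,
    pvAFind (String.ofList t) i =
      (if pvFindSpec t (i + 1) = 0 then none
       else some (String.ofList (t.drop (pvFindSpec t (i + 1))))) := by
  intro i
  induction hk : (t.length / 2 + 1 - (i + 1)) using Nat.strong_induction_on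
    generalizing i with
  | _ k ih =>
  rw [pvAFind.eq_def, pvFindSpec.eq_def]
  by_cases hb : i < (String.ofList t).toList.length / 2
  · have hb' : i + 1 ≤ t.length / 2 := by simpa using hb
    have h2 : 2 * (i + 1) ≤ t.length := by omega
    have hL1 : (1 : Nat) ≤ i + 1 := by omega
    have hcond : (PySem.Str.slice (String.ofList t) none (some ((i : Int) + 1))
         == PySem.Str.slice (String.ofList t) (some ((i : Int) + 1)) (some (2 * ((i : Int) + 1))))
        = decide (i + 1 ≤ pvLcp t (t.drop (i + 1))) := by
      have hc1 : ((i : Int) + 1) = ((i + 1 : Nat) : Int) := by push_cast; ring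
      have hc2 : (2 * (((i + 1 : Nat)) : Int)) = ((2 * (i + 1) : Nat) : Int) := by
        push_cast; ring
      rw [hc1, hc2]
      simp only [PySem.Str.slice, PySem.Chars.slice_eq_listSlice, String.toList_ofList,
        PySem.List.slice_to_natCast, PySem.List.slice_natCast]
      have hsub : 2 * (i + 1) - (i + 1) = i + 1 := by omega
      rw [hsub]
      by_cases hP : i + 1 ≤ pvLcp t (t.drop (i + 1))
      · rw [decide_eq_true hP]
        exact beq_iff_eq.mpr (congrArg _ ((pv_cond_iff t (i + 1) hL1 h2).mpr hP))
      · rw [decide_eq_false hP]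
        apply beq_eq_false_iff_ne.mpr
        intro hEq
        exact hP ((pv_cond_iff t (i + 1) hL1 h2).mp
          (by simpa using congrArg String.toList hEq))
    rw [if_pos hb, if_pos hb', hcond]
    by_cases hz : i + 1 ≤ pvLcp t (t.drop (i + 1))
    · rw [decide_eq_true hz, if_pos hz]
      have hslice : PySem.Str.slice (String.ofList t) (some ((i : Int) + 1)) none
          = String.ofList (t.drop (i + 1)) := by
        have hc1 : ((i : Int) + 1) = ((i + 1 : Nat) : Int) := by push_cast; ring
        rw [hc1]
        simp only [PySem.Str.slice, PySem.Chars.slice_eq_listSlice, String.toList_ofList]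
        rw [PySem.List.slice_from_natCast]
      rw [if_pos rfl, hslice]
      simp
    · rw [decide_eq_false hz, if_neg hz]
      simp only [Bool.false_eq_true, if_false]
      exact ih (t.length / 2 + 1 - (i + 1 + 1)) (by omega) (i + 1) rfl
  · have hb' : ¬ (i + 1 ≤ t.length / 2) := by simpa using hb
    rw [if_neg hb, if_neg hb']
    simp

-- the two outer loops agree, fuel against A's counter
theorem pv_loop_equiv : ∀ fuel, fuel ≤ 101 → ∀ t : List Char,
    pvALoop fuel (101 - fuel) (String.ofList t) = String.ofList (pvBLoop fuel t) := by
  intro fuel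
  induction fuel with
  | zero => intro _ t; rfl
  | succ fuel ih =>
    intro hf t
    simp only [pvALoop, pvBLoop]
    have hctr : 101 - (fuel + 1) + 1 = 101 - fuel := by omega
    rw [pv_find_equiv t 0, pv_scan_spec t]
    simp only [Nat.zero_add]
    by_cases h0 : pvFindSpec t 1 = 0
    · simp [h0]
    · rw [if_neg h0]
      simp only [h0, if_false]
      by_cases hfz : fuel = 0
      · subst hfz
        have : (101 - (0 + 1) + 1 > 100) := by omega
        simp [this, pvBLoop]
      · have hg : ¬ (101 - (fuel + 1) + 1 > 100) := by omega
        rw [if_neg hg, hctr]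
        exact ih (by omega) (t.drop (pvFindSpec t 1))

-- ===== VERDICT (by name: the statement is the Claim_ definition above) =====
theorem remove_repeated_substrings_spec : Claim_equal_remove_repeated_substrings := by
  intro text _
  unfold Spec_remove_repeated_substrings remove_repeated_substrings remove_repeated_substrings_alt
  have := pv_loop_equiv 101 (by omega) text.toList
  simpa using this
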